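-- pv_equiv track=rewrite | github.com/farnazj/Domain-Separation-Networks | data/dataset.py | padmask
-- ===== SOURCE A (Python) =====
-- def padmask(origlen, maxlen):
--     m = []
--
--     for i in range(maxlen):
--         if i < origlen:
--             m.append(1)
--         else:
--             m.append(0)
--     return m
-- ===== SOURCE B (Python) =====
-- def padmask(origlen, maxlen):
--     total = max(maxlen, 0)
--     ones = min(max(origlen, 0), total)
--     return [1] * ones + [0] * (total - ones)
-- ===== Notes on version B (the rewrite author's own statement) =====
-- stated objective: simpler
-- what changed: Replaces the per-index loop with a branch test by a closed-form count of ones followed by concatenation of two constant segments.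
import Mathlib
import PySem

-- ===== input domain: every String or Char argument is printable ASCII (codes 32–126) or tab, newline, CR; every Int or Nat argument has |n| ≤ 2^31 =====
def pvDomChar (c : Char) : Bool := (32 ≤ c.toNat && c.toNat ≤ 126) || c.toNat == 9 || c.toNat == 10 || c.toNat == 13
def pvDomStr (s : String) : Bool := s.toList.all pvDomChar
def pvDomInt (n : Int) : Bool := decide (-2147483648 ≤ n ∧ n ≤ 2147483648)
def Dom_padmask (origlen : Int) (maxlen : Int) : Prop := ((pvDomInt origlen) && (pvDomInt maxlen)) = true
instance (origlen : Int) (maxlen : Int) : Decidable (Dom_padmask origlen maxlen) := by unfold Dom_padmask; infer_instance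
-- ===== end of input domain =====

-- B builds the mask as two constant segments from a closed-form count of ones instead of a per-index test (objective: simpler).

-- ===== PORT A =====
def padmask (origlen : Int) (maxlen : Int) : List Int :=
  (PySem.List.pyRange 0 maxlen 1).foldl
    (fun m i => if i < origlen then m ++ [(1 : Int)] else m ++ [(0 : Int)]) []

-- ===== PORT B =====
def padmask_alt (origlen : Int) (maxlen : Int) : List Int :=
  let total := max maxlen 0
  let ones := min (max origlen 0) total
  List.replicate ones.toNat 1 ++ List.replicate (total - ones).toNat 0

-- ===== PRECONDITION & SPEC =====
def Spec_padmask (origlen : Int) (maxlen : Int) (out : List Int) : Prop := out = padmask_alt origlen maxlen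
instance (origlen : Int) (maxlen : Int) (out : List Int) : Decidable (Spec_padmask origlen maxlen out) := by unfold Spec_padmask; infer_instance

-- ===== CLAIM (what is proved, stated in full; the proofs are below) =====
def Claim_equal_padmask : Prop := ∀ (origlen : Int) (maxlen : Int), Dom_padmask origlen maxlen → Spec_padmask origlen maxlen (padmask origlen maxlen)

-- ===== LEMMAS AND PROOFS =====
theorem range_map_ite (o : Int) (n : Nat) :
    (List.range n).map (fun (k : Nat) => if (k : Int) < o then (1 : Int) else 0)
      = List.replicate (min (max o 0).toNat n) 1 ++ List.replicate (n - min (max o 0).toNat n) 0 := by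
  induction n with
  | zero => simp
  | succ n ih =>
    rw [List.range_succ, List.map_append, ih]
    by_cases h : (n : Int) < o
    · have h2 : min (max o 0).toNat n = n := by omega
      simp [h, h2, List.replicate_succ' (n := n)]
    · have h1 : min (max o 0).toNat (n + 1) = min (max o 0).toNat n := by omega
      have h2 : (n + 1) - min (max o 0).toNat n = (n - min (max o 0).toNat n) + 1 := by omega
      simp only [List.map_cons, List.map_nil, if_neg h, h1, h2,
        List.replicate_succ' (n := n - min (max o 0).toNat n), List.append_assoc]

-- ===== VERDICT (by name: the statement is the Claim_ definition above) =====
theorem padmask_spec : Claim_equal_padmask := by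
  intro origlen maxlen _
  unfold Spec_padmask padmask padmask_alt
  have hfold : ∀ (l : List Int) (acc : List Int),
      l.foldl (fun m i => if i < origlen then m ++ [(1 : Int)] else m ++ [(0 : Int)]) acc
        = acc ++ l.map (fun i => if i < origlen then (1 : Int) else 0) := by
    intro l
    induction l with
    | nil => simp
    | cons x xs ih =>
      intro acc
      by_cases h : x < origlen <;> simp [h, ih, List.append_assoc]
  rw [hfold, PySem.List.pyRange_one, List.map_map]
  have hco : ∀ k : Nat, ((fun i => if i < origlen then (1 : Int) else 0) ∘ (fun k : Nat => (0 : Int) + k)) k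
      = (fun (k : Nat) => if (k : Int) < origlen then (1 : Int) else 0) k := by
    intro k; simp
  rw [List.map_congr_left (fun k _ => hco k), range_map_ite]
  have h1 : (min (max origlen 0) (max maxlen 0)).toNat = min (max origlen 0).toNat maxlen.toNat := by omega
  have h2 : (max maxlen 0 - min (max origlen 0) (max maxlen 0)).toNat
      = maxlen.toNat - min (max origlen 0).toNat maxlen.toNat := by omega
  simp [h1, h2]
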